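-- pv_equiv track=rewrite | github.com/colinxy/ProjectEuler | Python/project_euler17.py | in_word_under1000
-- ===== SOURCE A (Python) =====
-- DIGITS = ["zero", "one", "two", "three", "four",
--           "five", "six", "seven", "eight", "nine"]
--
-- TENS = ["twenty", "thirty", "forty", "fifty",
--         "sixty", "seventy", "eighty", "ninety"]
--
-- BWN10_20 = ["ten", "eleven", "twelve", "thirteen", "fourteen",
--             "fifteen", "sixteen", "seventeen", "eighteen", "nineteen"]
--
-- def in_word_under1000(x):
--     in_word = []
--
--     if x < 10:
--         in_word.append(DIGITS[x])
--     elif 10 <= x < 20: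
--         in_word.append(BWN10_20[x-10])
--     elif 20 <= x < 100:
--         word = TENS[x//10-2]
--         if x % 10 != 0:
--             word += DIGITS[x%10]
--         in_word.append(word)
--     else:
--         in_word.append(DIGITS[x//100])
--         in_word.append("hundred")
--         under100 = x % 100
--         if under100 != 0:
--             in_word.append("and")
--             in_word.extend(in_word_under1000(under100))
--
--     return in_word
-- ===== SOURCE B (Python) =====
-- DIGITS = ["zero", "one", "two", "three", "four",
--           "five", "six", "seven", "eight", "nine"]
--
-- TENS = ["twenty", "thirty", "forty", "fifty",
--         "sixty", "seventy", "eighty", "ninety"]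
--
-- BWN10_20 = ["ten", "eleven", "twelve", "thirteen", "fourteen",
--             "fifteen", "sixteen", "seventeen", "eighteen", "nineteen"]
--
-- # One flat lookup table for every value below 100, built once:
-- # indices 0-9, 10-19, then 20-99 as "twenty".."ninety" glued to a digit.
-- WORDS100 = DIGITS + BWN10_20 + \
--     [t + ("" if u == 0 else DIGITS[u]) for t in TENS for u in range(10)]
--
--
-- def in_word_under1000(x):
--     if x < 100:
--         return [WORDS100[x]]
--     q, r = divmod(x, 100)
--     out = [DIGITS[q], "hundred"]
--     if r != 0:
--         out.append("and")
--         out.append(WORDS100[r])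
--     return out
-- ===== Notes on version B (the rewrite author's own statement) =====
-- stated objective: simpler
-- what changed: Replaces the recursive if/elif ladder with a flat 100-entry word table built once by a comprehension; the function itself is just a table lookup below 100 and a divmod for the hundreds case, with no self-recursion.
-- outside the precondition, e.g. on in_word_under1000(-1): A returns ['nine'], B returns ['ninetynine']; on in_word_under1000(-10): A returns ['zero'], B returns ['ninety']
import Mathlib
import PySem

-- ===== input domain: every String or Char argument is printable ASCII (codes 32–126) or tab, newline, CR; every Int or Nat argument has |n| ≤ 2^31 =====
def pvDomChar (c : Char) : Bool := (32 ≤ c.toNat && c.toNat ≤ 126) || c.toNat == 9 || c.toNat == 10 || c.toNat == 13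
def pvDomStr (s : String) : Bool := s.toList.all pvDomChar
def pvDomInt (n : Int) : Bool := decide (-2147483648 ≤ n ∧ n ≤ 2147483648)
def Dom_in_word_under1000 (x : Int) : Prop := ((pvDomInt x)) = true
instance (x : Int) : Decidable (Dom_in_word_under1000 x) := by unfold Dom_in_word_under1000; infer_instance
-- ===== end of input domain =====

-- B replaces A's recursive if/elif ladder by a flat 100-entry word table built once,
-- so the function is a lookup below 100 plus one divmod for the hundreds (objective: simpler).

def pvDIGITS : List String := ["zero", "one", "two", "three", "four",
  "five", "six", "seven", "eight", "nine"]

def pvTENS : List String := ["twenty", "thirty", "forty", "fifty",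
  "sixty", "seventy", "eighty", "ninety"]

def pvBWN10_20 : List String := ["ten", "eleven", "twelve", "thirteen", "fourteen",
  "fifteen", "sixteen", "seventeen", "eighteen", "nineteen"]

-- ===== PORT A =====
def in_word_under1000 (x : Int) : List String :=
  if _h1 : x < 10 then
    [PySem.List.pyGetD pvDIGITS x ""]
  else if _h2 : 10 ≤ x ∧ x < 20 then
    [PySem.List.pyGetD pvBWN10_20 (x - 10) ""]
  else if _h3 : 20 ≤ x ∧ x < 100 then
    let word := PySem.List.pyGetD pvTENS (PySem.Int.floordiv x 10 - 2) ""
    let word := if PySem.Int.mod x 10 ≠ 0 then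
        word ++ PySem.List.pyGetD pvDIGITS (PySem.Int.mod x 10) "" else word
    [word]
  else
    let head := [PySem.List.pyGetD pvDIGITS (PySem.Int.floordiv x 100) "", "hundred"]
    let under100 := PySem.Int.mod x 100
    if under100 ≠ 0 then
      head ++ ["and"] ++ in_word_under1000 under100
    else
      head
termination_by x.toNat
decreasing_by
  have h1 := PySem.Int.mod_nonneg x (b := 100) (by norm_num)
  have h2 := PySem.Int.mod_lt x (b := 100) (by norm_num)
  omega

-- ===== PORT B =====
def pvWORDS100 : List String :=
  pvDIGITS ++ pvBWN10_20 ++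
    pvTENS.flatMap (fun t =>
      (PySem.List.pyRange 0 10 1).map (fun u =>
        t ++ (if u = 0 then "" else PySem.List.pyGetD pvDIGITS u "")))

def in_word_under1000_alt (x : Int) : List String :=
  if x < 100 then
    [PySem.List.pyGetD pvWORDS100 x ""]
  else
    let q := PySem.Int.floordiv x 100
    let r := PySem.Int.mod x 100
    let out := [PySem.List.pyGetD pvDIGITS q "", "hundred"]
    if r ≠ 0 then out ++ ["and", PySem.List.pyGetD pvWORDS100 r ""] else out

-- ===== PRECONDITION & SPEC =====
-- Pre_ excludes x ≤ -11 and x ≥ 1000, where A raises IndexError, and -10 ≤ x ≤ -1,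
-- where A returns an accidental negative-index wraparound value (a corner nobody
-- would specify; B's own wraparound there is equally accidental and differs).
def Pre_in_word_under1000 (x : Int) : Prop := 0 ≤ x ∧ x < 1000
instance (x : Int) : Decidable (Pre_in_word_under1000 x) := by unfold Pre_in_word_under1000; infer_instance
def pvWitness_in_word_under1000 : Int := (342)
def Spec_in_word_under1000 (x : Int) (out : List String) : Prop := out = in_word_under1000_alt x
instance (x : Int) (out : List String) : Decidable (Spec_in_word_under1000 x out) := by unfold Spec_in_word_under1000; infer_instance

-- ===== CLAIM (what is proved, stated in full; the proofs are below) =====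
def Claim_equal_in_word_under1000 : Prop := ∀ (x : Int), Dom_in_word_under1000 x → Pre_in_word_under1000 x → Spec_in_word_under1000 x (in_word_under1000 x)

-- ===== LEMMAS AND PROOFS =====

-- A's under-100 if/elif ladder, written out non-recursively (proof helper only).
def pvALadder (x : Int) : List String :=
  if x < 10 then
    [PySem.List.pyGetD pvDIGITS x ""]
  else if 10 ≤ x ∧ x < 20 then
    [PySem.List.pyGetD pvBWN10_20 (x - 10) ""]
  else if 20 ≤ x ∧ x < 100 then
    let word := PySem.List.pyGetD pvTENS (PySem.Int.floordiv x 10 - 2) ""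
    let word := if PySem.Int.mod x 10 ≠ 0 then
        word ++ PySem.List.pyGetD pvDIGITS (PySem.Int.mod x 10) "" else word
    [word]
  else []

theorem pv_A_ladder (x : Int) (h : x < 100) : in_word_under1000 x = pvALadder x := by
  rw [in_word_under1000]; unfold pvALadder
  split_ifs <;> first | rfl | omega

theorem pv_ladder_table : ∀ n : Fin 100,
    pvALadder (n : Int) = [PySem.List.pyGetD pvWORDS100 (n : Int) ""] := by
  set_option maxRecDepth 100000 in decide

theorem pv_under100_eq (x : Int) (h0 : 0 ≤ x) (h : x < 100) :
    in_word_under1000 x = [PySem.List.pyGetD pvWORDS100 x ""] := by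
  rw [pv_A_ladder x h]
  have hx : (((⟨x.toNat, by omega⟩ : Fin 100) : Nat) : Int) = x := by simp; omega
  rw [← hx, pv_ladder_table ⟨x.toNat, by omega⟩]

theorem pv_alt_under100 (x : Int) (h : x < 100) :
    in_word_under1000_alt x = [PySem.List.pyGetD pvWORDS100 x ""] := by
  rw [in_word_under1000_alt, if_pos h]

theorem pv_A_hundreds (x : Int) (h : 100 ≤ x) :
    in_word_under1000 x =
      (let head := [PySem.List.pyGetD pvDIGITS (PySem.Int.floordiv x 100) "", "hundred"]
       if PySem.Int.mod x 100 ≠ 0 then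
         head ++ ["and"] ++ in_word_under1000 (PySem.Int.mod x 100)
       else head) := by
  rw [in_word_under1000]
  rw [dif_neg (by omega), dif_neg (by omega), dif_neg (by omega)]

theorem pv_alt_hundreds (x : Int) (h : 100 ≤ x) :
    in_word_under1000_alt x =
      (if PySem.Int.mod x 100 ≠ 0 then
        [PySem.List.pyGetD pvDIGITS (PySem.Int.floordiv x 100) "", "hundred",
         "and", PySem.List.pyGetD pvWORDS100 (PySem.Int.mod x 100) ""]
       else [PySem.List.pyGetD pvDIGITS (PySem.Int.floordiv x 100) "", "hundred"]) := by
  rw [in_word_under1000_alt, if_neg (by omega)]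
  rfl

-- ===== VERDICT (by name: the statement is the Claim_ definition above) =====
theorem in_word_under1000_spec : Claim_equal_in_word_under1000 := by
  intro x _ hpre
  unfold Spec_in_word_under1000
  obtain ⟨hx0, hx1000⟩ := hpre
  by_cases h : x < 100
  · rw [pv_alt_under100 x h, pv_under100_eq x hx0 h]
  · have h100 : 100 ≤ x := by omega
    have hr0 := PySem.Int.mod_nonneg x (b := 100) (by norm_num)
    have hr1 := PySem.Int.mod_lt x (b := 100) (by norm_num)
    rw [pv_A_hundreds x h100, pv_alt_hundreds x h100]
    by_cases hr : PySem.Int.mod x 100 = 0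
    · rw [if_neg (by omega), if_neg (by omega)]
    · rw [if_pos hr, if_pos hr, pv_under100_eq _ hr0 hr1]
      rfl
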